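-- pv_equiv track=rewrite | github.com/derekrex333/math_engine | matematicas_discretas/combinatoria/variaciones.py | variaciones_con_repeticion
-- ===== SOURCE A (Python) =====
-- def variaciones_con_repeticion(elementos: list, k: int) -> list[tuple]:
--     """
--     Genera todas las variaciones CON repetición de tamaño k.
--     Implementación recursiva sin usar itertools.
--
--     Parámetros
--     ----------
--     elementos : list   elementos disponibles (pueden repetirse)
--     k         : int    tamaño de cada variación
--     """
--     elementos = list(elementos)
--
--     if k < 0:
--         raise ValueError(f"k debe ser >= 0, recibido k={k}")
--     if k == 0:
--         return [()]
--
--     resultado = []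
--     for elem in elementos:
--         for sub in variaciones_con_repeticion(elementos, k - 1):
--             resultado.append((elem,) + sub)
--     return resultado
-- ===== SOURCE B (Python) =====
-- def variaciones_con_repeticion(elementos: list, k: int) -> list:
--     """Bottom-up: extend each partial tuple on the right, one pass per position."""
--     elementos = list(elementos)
--     if k < 0:
--         raise ValueError(f"k debe ser >= 0, recibido k={k}")
--     resultado = [()]
--     for _ in range(k):
--         resultado = [t + (e,) for t in resultado for e in elementos]
--     return resultado
-- ===== Notes on version B (the rewrite author's own statement) =====
-- stated objective: faster
-- what changed: Replaces the recursion that re-generates the whole (k-1)-level result once per element with a bottom-up loop that extends each partial tuple on the right, building each level exactly once.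
import Mathlib
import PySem

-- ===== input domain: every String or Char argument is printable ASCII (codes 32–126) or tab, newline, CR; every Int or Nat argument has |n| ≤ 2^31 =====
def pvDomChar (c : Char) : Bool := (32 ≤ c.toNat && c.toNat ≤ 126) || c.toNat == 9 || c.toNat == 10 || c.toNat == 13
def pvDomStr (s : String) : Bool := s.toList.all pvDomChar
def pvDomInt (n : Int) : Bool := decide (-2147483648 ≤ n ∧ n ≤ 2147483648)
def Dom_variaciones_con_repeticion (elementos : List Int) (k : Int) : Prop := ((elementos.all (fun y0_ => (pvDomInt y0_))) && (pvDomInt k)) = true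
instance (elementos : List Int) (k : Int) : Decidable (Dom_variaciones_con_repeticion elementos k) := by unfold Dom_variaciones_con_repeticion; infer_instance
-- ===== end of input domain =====

-- B replaces A's recursion (which regenerates the (k-1)-level list once per element)
-- with a bottom-up loop extending each partial tuple on the right; same output, built once per level.


-- ===== PORT A =====
-- A raises ValueError for k < 0; that case is outside Pre_ and the port returns [] there.
def variaciones_con_repeticion (elementos : List Int) (k : Int) : List (List Int) :=
  if _h : k < 0 then []
  else if _h0 : k = 0 then [[]]
  else
    elementos.foldl
      (fun resultado elem =>
        resultado ++ (variaciones_con_repeticion elementos (k - 1)).map (fun sub => elem :: sub))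
      []
termination_by k.toNat
decreasing_by omega

-- ===== PORT B =====
-- B raises the same ValueError for k < 0; outside Pre_ the port returns [].
def variaciones_con_repeticion_alt (elementos : List Int) (k : Int) : List (List Int) :=
  if k < 0 then []
  else
    (List.range k.toNat).foldl
      (fun resultado _ =>
        resultado.flatMap (fun t => elementos.map (fun e => t ++ [e])))
      [[]]

-- ===== PRECONDITION & SPEC =====
-- Both A and B raise ValueError when k < 0; Pre_ excludes exactly those inputs.
def Pre_variaciones_con_repeticion (elementos : List Int) (k : Int) : Prop := 0 ≤ k
instance (elementos : List Int) (k : Int) : Decidable (Pre_variaciones_con_repeticion elementos k) := by unfold Pre_variaciones_con_repeticion; infer_instance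
def pvWitness_variaciones_con_repeticion : List Int × Int := ([1, 2], 2)

def Spec_variaciones_con_repeticion (elementos : List Int) (k : Int) (out : List (List Int)) : Prop := out = variaciones_con_repeticion_alt elementos k
instance (elementos : List Int) (k : Int) (out : List (List Int)) : Decidable (Spec_variaciones_con_repeticion elementos k out) := by unfold Spec_variaciones_con_repeticion; infer_instance

-- ===== CLAIM (what is proved, stated in full; the proofs are below) =====
def Claim_equal_variaciones_con_repeticion : Prop := ∀ (elementos : List Int) (k : Int), Dom_variaciones_con_repeticion elementos k → Pre_variaciones_con_repeticion elementos k → Spec_variaciones_con_repeticion elementos k (variaciones_con_repeticion elementos k)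

-- ===== LEMMAS AND PROOFS =====

-- canonical prefix-built level-n list
def pvW (elementos : List Int) : Nat → List (List Int)
  | 0 => [[]]
  | n + 1 => elementos.flatMap (fun e => (pvW elementos n).map (fun sub => e :: sub))

-- B's one step
def pvStep (elementos : List Int) (L : List (List Int)) : List (List Int) :=
  L.flatMap (fun t => elementos.map (fun e => t ++ [e]))

theorem pvStep_map_cons (elementos : List Int) (e : Int) (L : List (List Int)) :
    pvStep elementos (L.map (fun sub => e :: sub)) = (pvStep elementos L).map (fun sub => e :: sub) := by
  simp [pvStep, List.flatMap_map, List.map_flatMap, List.map_map, Function.comp_def]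

theorem pvStep_flatMap (elementos xs : List Int) (f : Int → List (List Int)) :
    pvStep elementos (xs.flatMap f) = xs.flatMap (fun x => pvStep elementos (f x)) := by
  simp [pvStep, List.flatMap_assoc]

theorem pvStep_W (elementos : List Int) (n : Nat) :
    pvStep elementos (pvW elementos n) = pvW elementos (n + 1) := by
  induction n with
  | zero =>
    induction elementos with
    | nil => rfl
    | cons x xs ih => simp_all [pvW, pvStep]
  | succ n ih =>
    show pvStep elementos (pvW elementos (n + 1)) = pvW elementos (n + 2)
    rw [show pvW elementos (n + 1)
          = elementos.flatMap (fun e => (pvW elementos n).map (fun sub => e :: sub)) from rfl,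
        pvStep_flatMap]
    simp only [pvStep_map_cons, ih]
    rfl
theorem pvB_eq_W (elementos : List Int) (n : Nat) :
    (List.range n).foldl (fun resultado _ =>
        resultado.flatMap (fun t => elementos.map (fun e => t ++ [e]))) [[]]
      = pvW elementos n := by
  induction n with
  | zero => simp [pvW]
  | succ n ih =>
    rw [List.range_succ, List.foldl_append, ih]
    simpa [pvStep] using pvStep_W elementos n

theorem pvA_eq_W (elementos : List Int) (n : Nat) :
    variaciones_con_repeticion elementos (↑n) = pvW elementos n := by
  induction n with
  | zero => simp [variaciones_con_repeticion, pvW]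
  | succ n ih =>
    rw [variaciones_con_repeticion,
        dif_neg (show ¬(((n + 1 : Nat) : Int) < 0) by omega),
        dif_neg (show ¬(((n + 1 : Nat) : Int) = 0) by omega),
        PySem.List.foldl_append_eq_flatMap,
        show ((n + 1 : Nat) : Int) - 1 = ((n : Nat) : Int) by omega, ih]
    simp only [List.nil_append]
    rfl

-- ===== VERDICT (by name: the statement is the Claim_ definition above) =====
theorem variaciones_con_repeticion_spec : Claim_equal_variaciones_con_repeticion := by
  intro elementos k _ hk
  unfold Spec_variaciones_con_repeticion variaciones_con_repeticion_alt
  obtain ⟨n, rfl⟩ := Int.eq_ofNat_of_zero_le hk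
  rw [if_neg (show ¬((n : Int) < 0) by omega), Int.toNat_natCast, pvB_eq_W, pvA_eq_W]
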